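-- pv_equiv track=rewrite | github.com/gh0stintheshe11/LeetCode-Solutions | solutions/number-of-divisible-substrings/Python3.py | countDivisibleSubstrings
-- ===== SOURCE A (Python) =====
-- from collections import defaultdict
--
-- def countDivisibleSubstrings(word: str) -> int:
--
--     def count_divisible_for_digit(try_digit, mapped_digits):
--         seen = defaultdict(int)
--         seen[0] = 1
--         sub_count = prefix_sum =  0
--         for mapped_digit in mapped_digits:
--             prefix_sum += mapped_digit - try_digit
--             sub_count += seen[prefix_sum]
--             seen[prefix_sum] += 1
--         return sub_count
--
--     mapped_digits = [(ord(char) - ord('c')) // 3 +  2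
--                      for char in word]
--
--     return sum(
--                 count_divisible_for_digit(try_digit, mapped_digits)
--                 for try_digit in range(1, 10)
--             )
-- ===== SOURCE B (Python) =====
-- def countDivisibleSubstrings(word: str) -> int:
--     m = [(ord(c) - ord('c')) // 3 + 2 for c in word]
--     total = 0
--     while m:
--         s = 0
--         length = 0
--         for x in m:
--             s += x
--             length += 1
--             if s % length == 0 and 1 <= s // length <= 9:
--                 total += 1
--         m = m[1:]
--     return total
-- ===== Notes on version B (the rewrite author's own statement) =====
-- stated objective: simpler
-- what changed: Replaced the 9-fold per-target-average pass with its defaultdict of shifted prefix-sum counts by a single direct scan over suffixes that keeps a running sum and counts a substring when its length divides the sum with quotient in 1..9 (no hashmap, no per-digit loop).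
import Mathlib
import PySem

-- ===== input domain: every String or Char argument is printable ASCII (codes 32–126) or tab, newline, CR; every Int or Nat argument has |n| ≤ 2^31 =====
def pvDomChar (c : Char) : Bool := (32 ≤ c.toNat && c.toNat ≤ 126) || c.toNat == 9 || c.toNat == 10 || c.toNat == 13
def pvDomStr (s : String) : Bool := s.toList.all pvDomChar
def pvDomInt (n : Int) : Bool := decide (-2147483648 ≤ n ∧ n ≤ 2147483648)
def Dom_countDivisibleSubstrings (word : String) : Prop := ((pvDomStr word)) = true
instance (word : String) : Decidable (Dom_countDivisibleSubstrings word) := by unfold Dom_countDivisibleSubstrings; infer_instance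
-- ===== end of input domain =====

-- B replaces A's nine per-target-average hashmap passes by one direct scan over suffixes
-- testing "length divides sum with quotient in 1..9"; objective: simpler (no hashmap, no per-digit loop).

-- ===== PORT A =====
-- count_divisible_for_digit(try_digit, mapped_digits): prefix-sum counting with a defaultdict
def countForDigit (tryDigit : Int) (mappedDigits : List Int) : Int :=
  (mappedDigits.foldl
    (fun (st : PySem.Dict Int Int × Int × Int) mappedDigit =>
      let prefixSum := st.2.2 + mappedDigit - tryDigit
      let subCount := st.2.1 + st.1.getD prefixSum 0
      (st.1.modify prefixSum 0 (· + 1), subCount, prefixSum))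
    (PySem.Dict.empty.insert 0 1, 0, 0)).2.1

def countDivisibleSubstrings (word : String) : Int :=
  -- mapped_digits = [(ord(char) - ord('c')) // 3 + 2 for char in word]   (ord('c') = 99)
  let mappedDigits := word.toList.map (fun c => PySem.Int.floordiv ((c.toNat : Int) - 99) 3 + 2)
  -- sum(count_divisible_for_digit(d, mapped_digits) for d in range(1, 10))
  ((PySem.List.pyRange 1 10 1).map (fun d => countForDigit d mappedDigits)).sum

-- ===== PORT B =====
-- the inner 'for x in m: s += x; length += 1; if s % length == 0 and 1 <= s // length <= 9: total += 1'
-- state is (total, s, length)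
def bInner (m : List Int) (st : Int × Int × Int) : Int × Int × Int :=
  m.foldl
    (fun (st : Int × Int × Int) x =>
      let s := st.2.1 + x
      let len := st.2.2 + 1
      (if PySem.Int.mod s len = 0 ∧ 1 ≤ PySem.Int.floordiv s len ∧ PySem.Int.floordiv s len ≤ 9
       then st.1 + 1 else st.1, s, len))
    st

-- the 'while m: … ; m = m[1:]' loop (m[1:] of x :: rest is rest)
def bWhile (m : List Int) (total : Int) : Int :=
  match m with
  | [] => total
  | x :: rest => bWhile rest (bInner (x :: rest) (total, 0, 0)).1

def countDivisibleSubstrings_alt (word : String) : Int :=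
  let m := word.toList.map (fun c => PySem.Int.floordiv ((c.toNat : Int) - 99) 3 + 2)
  bWhile m 0

-- ===== PRECONDITION & SPEC =====
def Spec_countDivisibleSubstrings (word : String) (out : Int) : Prop := out = countDivisibleSubstrings_alt word
instance (word : String) (out : Int) : Decidable (Spec_countDivisibleSubstrings word out) := by unfold Spec_countDivisibleSubstrings; infer_instance

-- ===== CLAIM (what is proved, stated in full; the proofs are below) =====
def Claim_equal_countDivisibleSubstrings : Prop := ∀ (word : String), Dom_countDivisibleSubstrings word → Spec_countDivisibleSubstrings word (countDivisibleSubstrings word)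

-- ===== LEMMAS AND PROOFS =====

-- stream of shifted prefix sums q_k = (sum of first k elements) - d*k, offset by a start value p
def pvStreams (d : Int) : Int → List Int → List Int
  | _, [] => []
  | p, x :: xs => (p + x - d) :: pvStreams d (p + x - d) xs

-- A's hashmap count, history-style: pairs (value in history) matched left to right
def pvPairs : List Int → List Int → Nat
  | _, [] => 0
  | h, q :: qs => h.count q + pvPairs (h ++ [q]) qs

-- number of equal-valued pairs, counted from the front
def pvCPE : List Int → Nat
  | [] => 0
  | v :: vs => vs.count v + pvCPE vs

-- zeros of the d-shifted stream starting at offset q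
def pvZ (d : Int) : Int → List Int → Nat
  | _, [] => 0
  | q, x :: xs => (if q + x - d = 0 then 1 else 0) + pvZ d (q + x - d) xs

-- B's inner count with running sum s and length L
def pvGood : List Int → Int → Int → Nat
  | [], _, _ => 0
  | x :: xs, s, L =>
      (if PySem.Int.mod (s + x) (L + 1) = 0 ∧ 1 ≤ PySem.Int.floordiv (s + x) (L + 1)
          ∧ PySem.Int.floordiv (s + x) (L + 1) ≤ 9 then 1 else 0) + pvGood xs (s + x) (L + 1)

-- B's outer loop as a Nat
def pvOuterN : List Int → Nat
  | [] => 0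
  | x :: xs => pvGood (x :: xs) 0 0 + pvOuterN xs

def pvF (d : Int) (m : List Int) : Nat := pvCPE (0 :: pvStreams d 0 m)

-- ---- A side ----

lemma pvFoldA (d : Int) : ∀ (m : List Int) (dict : PySem.Dict Int Int) (c p : Int) (h : List Int),
    (∀ v, dict.getD v 0 = (h.count v : Int)) →
    ((m.foldl
      (fun (st : PySem.Dict Int Int × Int × Int) mappedDigit =>
        let prefixSum := st.2.2 + mappedDigit - d
        let subCount := st.2.1 + st.1.getD prefixSum 0
        (st.1.modify prefixSum 0 (· + 1), subCount, prefixSum))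
      (dict, c, p)).2.1)
      = c + (pvPairs h (pvStreams d p m) : Nat) := by
  intro m
  induction m with
  | nil => intro dict c p h _; simp [pvStreams, pvPairs]
  | cons x xs ih =>
      intro dict c p h hinv
      simp only [List.foldl_cons]
      have hinv' : ∀ v, (dict.modify (p + x - d) 0 (· + 1)).getD v 0
          = (((h ++ [p + x - d]).count v : Nat) : Int) := by
        intro v
        rw [PySem.Dict.getD_modify, List.count_append, List.count_cons, List.count_nil]
        simp only [beq_iff_eq]
        by_cases hv : v = p + x - d
        · subst hv; rw [if_pos rfl, hinv]; simp
        · rw [if_neg hv, hinv v, if_neg (fun hh => hv hh.symm)]; push_cast; ring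
      rw [ih _ _ _ _ hinv']
      simp only [pvStreams, pvPairs]
      rw [hinv (p + x - d)]
      push_cast; ring

lemma pvCountForDigit_eq (d : Int) (m : List Int) :
    countForDigit d m = (pvPairs [0] (pvStreams d 0 m) : Nat) := by
  have hinv : ∀ v, (PySem.Dict.empty.insert 0 1 : PySem.Dict Int Int).getD v 0
      = (([0] : List Int).count v : Nat) := by
    intro v
    rw [PySem.Dict.getD_insert]
    by_cases hv : v = 0
    · subst hv; simp
    · rw [if_neg hv]
      have hv' : ¬ ((0:Int) = v) := fun hh => hv hh.symm
      simp [PySem.Dict.getD_empty, hv']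
  have := pvFoldA d m (PySem.Dict.empty.insert 0 1) 0 0 [0] hinv
  rw [countForDigit, this]
  ring

lemma pvCPE_append_singleton : ∀ (h : List Int) (q : Int),
    pvCPE (h ++ [q]) = pvCPE h + h.count q := by
  intro h
  induction h with
  | nil => intro q; simp [pvCPE]
  | cons v h ih =>
      intro q
      simp only [List.cons_append, pvCPE, ih, List.count_append, List.count_cons, List.count_nil, beq_iff_eq]
      by_cases hvq : q = v
      · subst hvq; simp; omega
      · rw [if_neg hvq, if_neg (fun hh => hvq hh.symm)]; omega

lemma pvPairs_cpe : ∀ (qs h : List Int), pvPairs h qs + pvCPE h = pvCPE (h ++ qs) := by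
  intro qs
  induction qs with
  | nil => intro h; simp [pvPairs]
  | cons q qs ih =>
      intro h
      have h1 := ih (h ++ [q])
      have h2 := pvCPE_append_singleton h q
      have h3 : h ++ [q] ++ qs = h ++ q :: qs := by simp
      rw [h3] at h1
      simp only [pvPairs]
      omega

lemma pvF_eq (d : Int) (m : List Int) : countForDigit d m = (pvF d m : Nat) := by
  rw [pvCountForDigit_eq, pvF]
  have h := pvPairs_cpe (pvStreams d 0 m) [0]
  have h0 : pvCPE [0] = 0 := by simp [pvCPE]
  have h1 : ([0] : List Int) ++ pvStreams d 0 m = 0 :: pvStreams d 0 m := by simp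
  rw [h1, h0] at h
  omega


-- ---- stream shift ----

lemma pvStreams_shift (d : Int) : ∀ (l : List Int) (s t : Int),
    pvStreams d (s + t) l = (pvStreams d s l).map (· + t) := by
  intro l
  induction l with
  | nil => intro s t; simp [pvStreams]
  | cons x xs ih =>
      intro s t
      simp only [pvStreams, List.map_cons]
      rw [show s + t + x - d = (s + x - d) + t by ring, ih]

lemma pvCPE_map_add : ∀ (l : List Int) (t : Int), pvCPE (l.map (· + t)) = pvCPE l := by
  intro l
  induction l with
  | nil => intro t; simp [pvCPE]
  | cons v vs ih =>
      intro t
      simp only [List.map_cons, pvCPE, ih,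
        List.count_map_of_injective vs (· + t) (add_left_injective t) v]

lemma pvZ_count (d : Int) : ∀ (l : List Int) (q : Int),
    pvZ d q l = (pvStreams d q l).count 0 := by
  intro l
  induction l with
  | nil => intro q; simp [pvZ, pvStreams]
  | cons x xs ih =>
      intro q
      simp only [pvZ, pvStreams, ih, List.count_cons, beq_iff_eq]
      omega

lemma pvF_cons (d x : Int) (xs : List Int) :
    pvF d (x :: xs) = pvZ d 0 (x :: xs) + pvF d xs := by
  have hz : pvZ d 0 (x :: xs) = (pvStreams d 0 (x :: xs)).count 0 := pvZ_count d _ 0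
  have hshift : pvStreams d (0 + x - d) xs = (pvStreams d 0 xs).map (· + (x - d)) := by
    rw [show (0 : Int) + x - d = 0 + (x - d) by ring, pvStreams_shift]
  have hmap : pvStreams d 0 (x :: xs) = (0 :: pvStreams d 0 xs).map (· + (x - d)) := by
    simp only [pvStreams, List.map_cons, hshift]
    norm_num
  rw [pvF, pvCPE, hz, pvF]
  have : pvCPE (pvStreams d 0 (x :: xs)) = pvCPE (0 :: pvStreams d 0 xs) := by
    rw [hmap, pvCPE_map_add]
  omega

-- ---- B side ----

lemma pvBInner : ∀ (m : List Int) (tot s L : Int),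
    (bInner m (tot, s, L)).1 = tot + (pvGood m s L : Nat) := by
  intro m
  induction m with
  | nil => intro tot s L; simp [bInner, pvGood]
  | cons x xs ih =>
      intro tot s L
      simp only [bInner, List.foldl_cons] at ih ⊢
      rw [pvGood]
      split_ifs with hc
      · rw [ih (tot + 1) (s + x) (L + 1)]; push_cast; ring
      · rw [ih tot (s + x) (L + 1)]; push_cast; ring

lemma pvBWhile : ∀ (m : List Int) (tot : Int), bWhile m tot = tot + (pvOuterN m : Nat) := by
  intro m
  induction m with
  | nil => intro tot; simp [bWhile, pvOuterN]
  | cons x xs ih =>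
      intro tot
      rw [bWhile, ih, pvBInner, pvOuterN]
      push_cast; ring

-- ---- the mean test is the disjunction of the nine exact-sum tests ----

-- if L ∣ s with quotient d and L > 0 then s = d*L, and conversely
lemma pvMean (s L d : Int) (hL : 0 < L) :
    (if s - d * L = 0 then (1 : Nat) else 0)
    = if (PySem.Int.mod s L = 0 ∧ PySem.Int.floordiv s L = d) then 1 else 0 := by
  by_cases h : s - d * L = 0
  · rw [if_pos h, if_pos]
    have hs : s = d * L := by omega
    constructor
    · rw [PySem.Int.mod_eq_zero_iff_dvd]; exact ⟨d, by linarith [hs]⟩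
    · rw [PySem.Int.floordiv_eq_iff_of_pos hL]
      have : (d + 1) * L = d * L + L := by ring
      omega
  · rw [if_neg h, if_neg]
    rintro ⟨h1, h2⟩
    have h3 := PySem.Int.floordiv_mul_add_mod s L
    rw [h1, h2] at h3
    omega

lemma pvNine (s L : Int) (hL : 0 < L) :
    (if PySem.Int.mod s L = 0 ∧ 1 ≤ PySem.Int.floordiv s L ∧ PySem.Int.floordiv s L ≤ 9
     then (1 : Nat) else 0)
    = (if s - 1 * L = 0 then (1 : Nat) else 0) + (if s - 2 * L = 0 then 1 else 0)
      + (if s - 3 * L = 0 then 1 else 0) + (if s - 4 * L = 0 then 1 else 0)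
      + (if s - 5 * L = 0 then 1 else 0) + (if s - 6 * L = 0 then 1 else 0)
      + (if s - 7 * L = 0 then 1 else 0) + (if s - 8 * L = 0 then 1 else 0)
      + (if s - 9 * L = 0 then 1 else 0) := by
  rw [pvMean s L 1 hL, pvMean s L 2 hL, pvMean s L 3 hL, pvMean s L 4 hL, pvMean s L 5 hL,
    pvMean s L 6 hL, pvMean s L 7 hL, pvMean s L 8 hL, pvMean s L 9 hL]
  by_cases hm : PySem.Int.mod s L = 0
  · simp only [hm, true_and]
    split_ifs <;> omega
  · simp [hm]

lemma pvGood_eq_sumZ : ∀ (l : List Int) (s L : Int), 0 ≤ L →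
    pvGood l s L
    = pvZ 1 (s - 1 * L) l + pvZ 2 (s - 2 * L) l + pvZ 3 (s - 3 * L) l + pvZ 4 (s - 4 * L) l
      + pvZ 5 (s - 5 * L) l + pvZ 6 (s - 6 * L) l + pvZ 7 (s - 7 * L) l + pvZ 8 (s - 8 * L) l
      + pvZ 9 (s - 9 * L) l := by
  intro l
  induction l with
  | nil => intro s L _; simp [pvGood, pvZ]
  | cons x xs ih =>
      intro s L hL
      simp only [pvGood, pvZ]
      rw [show s - 1 * L + x - 1 = (s + x) - 1 * (L + 1) by ring,
        show s - 2 * L + x - 2 = (s + x) - 2 * (L + 1) by ring,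
        show s - 3 * L + x - 3 = (s + x) - 3 * (L + 1) by ring,
        show s - 4 * L + x - 4 = (s + x) - 4 * (L + 1) by ring,
        show s - 5 * L + x - 5 = (s + x) - 5 * (L + 1) by ring,
        show s - 6 * L + x - 6 = (s + x) - 6 * (L + 1) by ring,
        show s - 7 * L + x - 7 = (s + x) - 7 * (L + 1) by ring,
        show s - 8 * L + x - 8 = (s + x) - 8 * (L + 1) by ring,
        show s - 9 * L + x - 9 = (s + x) - 9 * (L + 1) by ring]
      rw [ih (s + x) (L + 1) (by omega), pvNine (s + x) (L + 1) (by omega)]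
      omega

-- ---- main ----

lemma pvMain : ∀ (m : List Int),
    pvOuterN m = pvF 1 m + pvF 2 m + pvF 3 m + pvF 4 m + pvF 5 m + pvF 6 m + pvF 7 m + pvF 8 m
      + pvF 9 m := by
  intro m
  induction m with
  | nil => simp [pvOuterN, pvF, pvStreams, pvCPE]
  | cons x xs ih =>
      rw [pvOuterN, pvF_cons 1, pvF_cons 2, pvF_cons 3, pvF_cons 4, pvF_cons 5, pvF_cons 6,
        pvF_cons 7, pvF_cons 8, pvF_cons 9, pvGood_eq_sumZ (x :: xs) 0 0 le_rfl]
      norm_num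
      omega

-- ===== VERDICT (by name: the statement is the Claim_ definition above) =====
theorem countDivisibleSubstrings_spec : Claim_equal_countDivisibleSubstrings := by
  unfold Claim_equal_countDivisibleSubstrings
  intro word _
  unfold Spec_countDivisibleSubstrings
  simp only [countDivisibleSubstrings, countDivisibleSubstrings_alt]
  have hr : PySem.List.pyRange 1 10 1 = [1, 2, 3, 4, 5, 6, 7, 8, 9] := by decide
  rw [hr]
  simp only [List.map_cons, List.map_nil, List.sum_cons, List.sum_nil]
  set m := word.toList.map (fun c => PySem.Int.floordiv ((c.toNat : Int) - 99) 3 + 2) with hm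
  rw [pvBWhile m 0, pvF_eq 1 m, pvF_eq 2 m, pvF_eq 3 m, pvF_eq 4 m, pvF_eq 5 m, pvF_eq 6 m,
    pvF_eq 7 m, pvF_eq 8 m, pvF_eq 9 m, pvMain m]
  push_cast
  ring
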